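-- pv_equiv track=rewrite | github.com/capbothers/Cass-Brothers_PIM | scripts/verify_billi_zip_capabilities.py | extract_filter_system_tag
-- ===== SOURCE A (Python) =====
-- from typing import Dict, List, Optional, Tuple
--
-- def extract_filter_system_tag(tags: List[str]) -> Optional[str]:
--     """Extract the NEWZIPFilterSystem or ZIPFilterSystem tag value."""
--     # Prefer NEWZIPFilterSystem (newer, more reliable)
--     for tag in tags:
--         for prefix in ['NEWZIPFilterSystem:', 'NEWZipFilterSystem:']:
--             if tag.startswith(prefix):
--                 return tag[len(prefix):].strip()
--     # Fall back to ZIPFilterSystem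
--     for tag in tags:
--         if tag.startswith('ZIPFilterSystem:'):
--             return tag[len('ZIPFilterSystem:'):].strip()
--     return None
-- ===== SOURCE B (Python) =====
-- from typing import List, Optional
--
-- def extract_filter_system_tag(tags: List[str]) -> Optional[str]:
--     """Extract the NEWZIPFilterSystem or ZIPFilterSystem tag value (single pass)."""
--     fallback = None
--     for tag in tags:
--         if tag.startswith('NEWZIPFilterSystem:') or tag.startswith('NEWZipFilterSystem:'):
--             return tag[len('NEWZIPFilterSystem:'):].strip()
--         if fallback is None and tag.startswith('ZIPFilterSystem:'):
--             fallback = tag[len('ZIPFilterSystem:'):].strip()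
--     return fallback
-- ===== Notes on version B (the rewrite author's own statement) =====
-- stated objective: simpler
-- what changed: Replaces A's two sequential scans over the tag list with a single pass that returns immediately on a NEW-prefixed tag and records the first ZIPFilterSystem value in a fallback variable.
import Mathlib
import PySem

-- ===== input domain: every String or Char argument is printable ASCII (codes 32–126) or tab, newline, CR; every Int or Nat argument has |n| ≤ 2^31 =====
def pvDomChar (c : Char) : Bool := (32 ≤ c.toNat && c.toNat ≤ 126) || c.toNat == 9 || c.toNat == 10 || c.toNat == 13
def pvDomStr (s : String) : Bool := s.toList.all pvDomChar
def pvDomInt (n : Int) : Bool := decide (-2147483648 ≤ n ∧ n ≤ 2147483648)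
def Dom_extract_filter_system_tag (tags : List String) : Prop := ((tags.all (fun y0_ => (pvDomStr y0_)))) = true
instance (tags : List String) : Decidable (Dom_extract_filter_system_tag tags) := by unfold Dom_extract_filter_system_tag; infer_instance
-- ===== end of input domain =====

-- B does one pass with a fallback variable instead of A's two scans; return value proved equal on all inputs.

-- ===== PORT A =====
-- first for-loop of A: scan for the two NEW prefixes (inner loop over the prefix list unrolled in order)
def pvScanNew : List String → Option String
  | [] => none
  | t :: ts =>
    if PySem.Str.startswith t "NEWZIPFilterSystem:" then
      some (PySem.Str.strip (PySem.Str.slice t (some 19) none))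
    else if PySem.Str.startswith t "NEWZipFilterSystem:" then
      some (PySem.Str.strip (PySem.Str.slice t (some 19) none))
    else pvScanNew ts

-- second for-loop of A: fall back to ZIPFilterSystem
def pvScanZip : List String → Option String
  | [] => none
  | t :: ts =>
    if PySem.Str.startswith t "ZIPFilterSystem:" then
      some (PySem.Str.strip (PySem.Str.slice t (some 16) none))
    else pvScanZip ts

def extract_filter_system_tag (tags : List String) : Option String :=
  match pvScanNew tags with
  | some v => some v
  | none => pvScanZip tags

-- ===== PORT B =====
-- single loop carrying the fallback accumulator
def pvAltLoop : List String → Option String → Option String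
  | [], fb => fb
  | t :: ts, fb =>
    if PySem.Str.startswith t "NEWZIPFilterSystem:" || PySem.Str.startswith t "NEWZipFilterSystem:" then
      some (PySem.Str.strip (PySem.Str.slice t (some 19) none))
    else if fb.isNone && PySem.Str.startswith t "ZIPFilterSystem:" then
      pvAltLoop ts (some (PySem.Str.strip (PySem.Str.slice t (some 16) none)))
    else pvAltLoop ts fb

def extract_filter_system_tag_alt (tags : List String) : Option String :=
  pvAltLoop tags none

-- ===== PRECONDITION & SPEC =====
def Spec_extract_filter_system_tag (tags : List String) (out : Option String) : Prop := out = extract_filter_system_tag_alt tags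
instance (tags : List String) (out : Option String) : Decidable (Spec_extract_filter_system_tag tags out) := by unfold Spec_extract_filter_system_tag; infer_instance

-- ===== CLAIM (what is proved, stated in full; the proofs are below) =====
def Claim_equal_extract_filter_system_tag : Prop := ∀ (tags : List String), Dom_extract_filter_system_tag tags → Spec_extract_filter_system_tag tags (extract_filter_system_tag tags)

-- ===== LEMMAS AND PROOFS =====
-- invariant of B's loop: it returns the first NEW hit, else the fallback, else the first ZIP hit
theorem pvAltLoop_eq (ts : List String) : ∀ fb : Option String,
    pvAltLoop ts fb =
      match pvScanNew ts with
      | some v => some v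
      | none => match fb with
                | some f => some f
                | none => pvScanZip ts := by
  induction ts with
  | nil => intro fb; cases fb <;> simp [pvAltLoop, pvScanNew, pvScanZip]
  | cons t ts ih =>
    intro fb
    by_cases h1 : PySem.Str.startswith t "NEWZIPFilterSystem:" = true <;>
      by_cases h2 : PySem.Str.startswith t "NEWZipFilterSystem:" = true <;>
        by_cases h3 : PySem.Str.startswith t "ZIPFilterSystem:" = true <;>
          cases fb <;>
            simp only [pvAltLoop, pvScanNew, pvScanZip, h1, h2, h3, Bool.or_true,
              Bool.or_false, Option.isNone_none, Option.isNone_some,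
              Bool.true_and, Bool.false_and, Bool.false_eq_true, if_true, if_false, ih]

-- ===== VERDICT (by name: the statement is the Claim_ definition above) =====
theorem extract_filter_system_tag_spec : Claim_equal_extract_filter_system_tag := by
  intro tags _
  unfold Spec_extract_filter_system_tag extract_filter_system_tag extract_filter_system_tag_alt
  rw [pvAltLoop_eq]
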